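-- pv_equiv track=rewrite | github.com/numsarai/Saraithong-BSIE | app.py | _mapping_feedback_status
-- ===== SOURCE A (Python) =====
-- def _normalized_mapping_snapshot(mapping: dict | None) -> dict[str, str]:
--     if not isinstance(mapping, dict):
--         return {}
--     snapshot: dict[str, str] = {}
--     for key, value in mapping.items():
--         text_key = str(key or "").strip()
--         if not text_key:
--             continue
--         text_value = str(value or "").strip()
--         snapshot[text_key] = text_value
--     return snapshot
--
-- def _mapping_feedback_status(confirmed_mapping: dict, suggested_mapping: dict) -> str:
--     suggested_snapshot = _normalized_mapping_snapshot(suggested_mapping)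
--     if not suggested_snapshot:
--         return "accepted"
--
--     confirmed_snapshot = _normalized_mapping_snapshot(confirmed_mapping)
--     all_keys = sorted(set(confirmed_snapshot) | set(suggested_snapshot))
--     for key in all_keys:
--         confirmed_value = confirmed_snapshot.get(key, "")
--         suggested_value = suggested_snapshot.get(key, "")
--         if confirmed_value != suggested_value and (confirmed_value or suggested_value):
--             return "corrected"
--     return "confirmed"
-- ===== SOURCE B (Python) =====
-- def _normalized_mapping_snapshot(mapping: dict | None) -> dict[str, str]:
--     if not isinstance(mapping, dict):
--         return {}
--     snapshot: dict[str, str] = {}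
--     for key, value in mapping.items():
--         text_key = str(key or "").strip()
--         if not text_key:
--             continue
--         text_value = str(value or "").strip()
--         snapshot[text_key] = text_value
--     return snapshot
--
-- def _mapping_feedback_status(confirmed_mapping: dict, suggested_mapping: dict) -> str:
--     suggested_snapshot = _normalized_mapping_snapshot(suggested_mapping)
--     if not suggested_snapshot:
--         return "accepted"
--     confirmed_snapshot = _normalized_mapping_snapshot(confirmed_mapping)
--     meaningful_confirmed = {k: v for k, v in confirmed_snapshot.items() if v}
--     meaningful_suggested = {k: v for k, v in suggested_snapshot.items() if v}
--     return "corrected" if meaningful_confirmed != meaningful_suggested else "confirmed"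
-- ===== Notes on version B (the rewrite author's own statement) =====
-- stated objective: simpler
-- what changed: Replaces the sorted-key-union per-key scan with building two dicts filtered to non-empty values and one dict equality test; the empty-suggested-snapshot guard stays on the unfiltered snapshot.
import Mathlib
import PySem

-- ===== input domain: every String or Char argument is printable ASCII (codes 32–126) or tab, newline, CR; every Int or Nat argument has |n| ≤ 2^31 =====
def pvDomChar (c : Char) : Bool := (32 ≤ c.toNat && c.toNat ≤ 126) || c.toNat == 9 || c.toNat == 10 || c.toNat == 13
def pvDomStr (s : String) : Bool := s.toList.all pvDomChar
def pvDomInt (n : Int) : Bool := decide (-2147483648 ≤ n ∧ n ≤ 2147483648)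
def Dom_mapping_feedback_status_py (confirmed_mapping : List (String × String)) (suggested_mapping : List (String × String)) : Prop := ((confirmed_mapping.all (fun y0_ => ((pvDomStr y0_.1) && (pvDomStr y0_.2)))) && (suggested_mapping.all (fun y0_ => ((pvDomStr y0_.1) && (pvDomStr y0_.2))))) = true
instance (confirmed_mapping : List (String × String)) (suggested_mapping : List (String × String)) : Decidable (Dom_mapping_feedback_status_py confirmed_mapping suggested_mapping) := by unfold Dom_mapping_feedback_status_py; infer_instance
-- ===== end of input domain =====

-- B replaces A's sorted-key-union per-key scan by one equality test of the two
-- value-filtered snapshots (simpler; return value only, no side effects involved).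

-- ===== PORT A =====
-- _normalized_mapping_snapshot (shared helper of both Pythons; keys/values are str here,
-- so `str(key or "").strip()` is just key.strip())
def pvSnapshot (mapping : List (String × String)) : PySem.Dict String String :=
  mapping.foldl (fun snapshot kv =>
    let text_key := PySem.Str.strip kv.1
    if text_key = "" then snapshot
    else snapshot.insert text_key (PySem.Str.strip kv.2)) PySem.Dict.empty

-- the `for key in all_keys: … return "corrected" … return "confirmed"` loop
def pvLoopA (cs ss : PySem.Dict String String) : List String → String
  | [] => "confirmed"
  | k :: rest =>
    let confirmed_value := cs.getD k ""
    let suggested_value := ss.getD k ""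
    if confirmed_value ≠ suggested_value ∧ (confirmed_value ≠ "" ∨ suggested_value ≠ "") then
      "corrected"
    else pvLoopA cs ss rest

def mapping_feedback_status_py (confirmed_mapping : List (String × String)) (suggested_mapping : List (String × String)) : String :=
  let suggested_snapshot := pvSnapshot suggested_mapping
  if suggested_snapshot.items = [] then "accepted"
  else
    let confirmed_snapshot := pvSnapshot confirmed_mapping
    let all_keys := PySem.List.sorted
      (PySem.Set.union (PySem.Set.ofList confirmed_snapshot.keys) suggested_snapshot.keys)
      (fun x => x) false
    pvLoopA confirmed_snapshot suggested_snapshot all_keys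

-- ===== PORT B =====
-- Python's `==` on two dicts: order-insensitive map equality
def pvDictEq (d1 d2 : PySem.Dict String String) : Bool :=
  d1.items.all (fun p => d2.get? p.1 == some p.2) &&
  d2.items.all (fun p => d1.get? p.1 == some p.2)

def mapping_feedback_status_py_alt (confirmed_mapping : List (String × String)) (suggested_mapping : List (String × String)) : String :=
  let suggested_snapshot := pvSnapshot suggested_mapping
  if suggested_snapshot.items = [] then "accepted"
  else
    let confirmed_snapshot := pvSnapshot confirmed_mapping
    let meaningful_confirmed := PySem.Dict.mk (confirmed_snapshot.items.filter (fun p => p.2 ≠ ""))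
    let meaningful_suggested := PySem.Dict.mk (suggested_snapshot.items.filter (fun p => p.2 ≠ ""))
    if pvDictEq meaningful_confirmed meaningful_suggested then "confirmed" else "corrected"

-- ===== PRECONDITION & SPEC =====
def Spec_mapping_feedback_status_py (confirmed_mapping : List (String × String)) (suggested_mapping : List (String × String)) (out : String) : Prop := out = mapping_feedback_status_py_alt confirmed_mapping suggested_mapping
instance (confirmed_mapping : List (String × String)) (suggested_mapping : List (String × String)) (out : String) : Decidable (Spec_mapping_feedback_status_py confirmed_mapping suggested_mapping out) := by unfold Spec_mapping_feedback_status_py; infer_instance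

-- ===== CLAIM (what is proved, stated in full; the proofs are below) =====
def Claim_equal_mapping_feedback_status_py : Prop := ∀ (confirmed_mapping : List (String × String)) (suggested_mapping : List (String × String)), Dom_mapping_feedback_status_py confirmed_mapping suggested_mapping → Spec_mapping_feedback_status_py confirmed_mapping suggested_mapping (mapping_feedback_status_py confirmed_mapping suggested_mapping)

-- ===== LEMMAS AND PROOFS =====

-- the snapshot fold keeps keys unique
theorem pvSnapshot_nodup_aux (l : List (String × String)) (d : PySem.Dict String String)
    (h : d.keys.Nodup) :
    (l.foldl (fun snapshot kv =>
      let text_key := PySem.Str.strip kv.1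
      if text_key = "" then snapshot
      else snapshot.insert text_key (PySem.Str.strip kv.2)) d).keys.Nodup := by
  induction l generalizing d with
  | nil => simpa using h
  | cons kv rest ih =>
    simp only [List.foldl_cons]
    by_cases hk : PySem.Str.strip kv.1 = ""
    · simp only [hk, if_true]
      exact ih _ h
    · simp only [if_neg hk]
      exact ih _ (PySem.Dict.nodup_keys_insert _ _ _ h)

theorem pvSnapshot_nodup (m : List (String × String)) : (pvSnapshot m).keys.Nodup :=
  pvSnapshot_nodup_aux m PySem.Dict.empty (by simp)

theorem getD_eq_of_not_mem_keys (d : PySem.Dict String String) (k : String)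
    (h : k ∉ d.keys) : d.getD k "" = "" := by
  apply PySem.Dict.getD_of_not_contains
  by_contra hc
  exact h ((PySem.Dict.contains_iff_mem_keys _ _).1 (by simpa using hc))

-- A's loop, characterised
theorem pvLoopA_eq (cs ss : PySem.Dict String String) (ks : List String) :
    pvLoopA cs ss ks =
      if ∀ k ∈ ks, cs.getD k "" = ss.getD k "" then "confirmed" else "corrected" := by
  induction ks with
  | nil => simp [pvLoopA]
  | cons k rest ih =>
    simp only [pvLoopA]
    by_cases h : cs.getD k "" = ss.getD k ""
    · have hcond : ¬ (cs.getD k "" ≠ ss.getD k "" ∧ (cs.getD k "" ≠ "" ∨ ss.getD k "" ≠ "")) := by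
        intro hc; exact hc.1 h
      rw [if_neg hcond, ih]
      by_cases hr : ∀ x ∈ rest, cs.getD x "" = ss.getD x ""
      · rw [if_pos hr, if_pos]
        intro x hx
        rcases List.mem_cons.1 hx with hx | hx
        · exact hx ▸ h
        · exact hr x hx
      · rw [if_neg hr, if_neg]
        intro hall
        exact hr fun x hx => hall x (List.mem_cons_of_mem _ hx)
    · have hne : cs.getD k "" ≠ "" ∨ ss.getD k "" ≠ "" := by
        by_contra hb
        push Not at hb
        exact h (hb.1.trans hb.2.symm)
      rw [if_pos ⟨h, hne⟩, if_neg (by intro hall; exact h (hall k (List.mem_cons_self)))]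

-- lookup in the value-filtered dict, in terms of getD on the original
theorem filter_get?_aux (l : List (String × String)) (hn : (l.map (·.1)).Nodup) (k : String) :
    (PySem.Dict.mk (l.filter (fun p => p.2 ≠ ""))).get? k =
      if (PySem.Dict.mk l).getD k "" = "" then none else some ((PySem.Dict.mk l).getD k "") := by
  induction l with
  | nil => simp [PySem.Dict.get?, PySem.Dict.getD]
  | cons p rest ih =>
    obtain ⟨a, b⟩ := p
    simp only [List.map_cons, List.nodup_cons] at hn
    by_cases hk : a = k
    · subst hk
      have hrest : (PySem.Dict.mk rest).getD a "" = "" := by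
        apply getD_eq_of_not_mem_keys
        simpa [PySem.Dict.keys] using hn.1
      by_cases hb : b = ""
      · subst hb
        rw [List.filter_cons, if_neg (by simp)]
        rw [ih hn.2]
        have hD : (PySem.Dict.mk ((a, "") :: rest)).getD a "" = "" := by
          simp [PySem.Dict.getD_eq_get?_getD, PySem.Dict.get?_mk_cons]
        rw [hD, if_pos rfl, if_pos hrest]
      · rw [List.filter_cons, if_pos (by simpa using hb)]
        have hD : (PySem.Dict.mk ((a, b) :: rest)).getD a "" = b := by
          simp [PySem.Dict.getD_eq_get?_getD, PySem.Dict.get?_mk_cons]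
        rw [PySem.Dict.get?_mk_cons, if_pos (by simp), hD, if_neg hb]
    · have hD : (PySem.Dict.mk ((a, b) :: rest)).getD k "" = (PySem.Dict.mk rest).getD k "" := by
        simp [PySem.Dict.getD_eq_get?_getD, PySem.Dict.get?_mk_cons, hk]
      simp only [List.filter_cons]
      by_cases hb : b = ""
      · rw [if_neg (by simpa using hb), ih hn.2, hD]
      · rw [if_pos (by simpa using hb), PySem.Dict.get?_mk_cons, if_neg (by simpa using hk),
          ih hn.2, hD]

theorem filter_get? (d : PySem.Dict String String) (hn : d.keys.Nodup) (k : String) :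
    (PySem.Dict.mk (d.items.filter (fun p => p.2 ≠ ""))).get? k =
      if d.getD k "" = "" then none else some (d.getD k "") := by
  have := filter_get?_aux d.items (by simpa [PySem.Dict.keys] using hn) k
  simpa using this

-- Python's `==` on the filtered dicts says exactly: same getD-with-"" everywhere
theorem pvDictEq_iff (cs ss : PySem.Dict String String)
    (hc : cs.keys.Nodup) (hs : ss.keys.Nodup) :
    pvDictEq (PySem.Dict.mk (cs.items.filter (fun p => p.2 ≠ "")))
             (PySem.Dict.mk (ss.items.filter (fun p => p.2 ≠ ""))) = true ↔
      ∀ k, cs.getD k "" = ss.getD k "" := by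
  constructor
  · intro h k
    simp only [pvDictEq, Bool.and_eq_true, List.all_eq_true, beq_iff_eq] at h
    by_cases hck : cs.getD k "" = ""
    · by_cases hsk : ss.getD k "" = ""
      · rw [hck, hsk]
      · -- ss has a meaningful value at k: it must appear in filtered cs too
        have hget : ss.get? k = some (ss.getD k "") := by
          rcases hq : ss.get? k with _ | v
          · exact absurd (by simp [PySem.Dict.getD_eq_get?_getD, hq]) hsk
          · simp [PySem.Dict.getD_eq_get?_getD, hq]
        have hmem : (k, ss.getD k "") ∈ (PySem.Dict.mk (ss.items.filter (fun p => p.2 ≠ ""))).items :=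
          List.mem_filter.2 ⟨PySem.Dict.mem_items_of_get?_eq_some _ hget, by simpa using hsk⟩
        have := h.2 _ hmem
        rw [filter_get? cs hc k, if_pos hck] at this
        exact absurd this (by simp)
    · have hget : cs.get? k = some (cs.getD k "") := by
        rcases hq : cs.get? k with _ | v
        · exact absurd (by simp [PySem.Dict.getD_eq_get?_getD, hq]) hck
        · simp [PySem.Dict.getD_eq_get?_getD, hq]
      have hmem : (k, cs.getD k "") ∈ (PySem.Dict.mk (cs.items.filter (fun p => p.2 ≠ ""))).items :=
        List.mem_filter.2 ⟨PySem.Dict.mem_items_of_get?_eq_some _ hget, by simpa using hck⟩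
      have := h.1 _ hmem
      rw [filter_get? ss hs k] at this
      by_cases hsk : ss.getD k "" = ""
      · rw [if_pos hsk] at this; exact absurd this (by simp)
      · rw [if_neg hsk] at this
        exact (Option.some.inj this).symm
  · intro h
    simp only [pvDictEq, Bool.and_eq_true, List.all_eq_true, beq_iff_eq]
    constructor
    · rintro ⟨k, v⟩ hm
      have hm' : (k, v) ∈ cs.items ∧ decide (v ≠ "") = true := List.mem_filter.1 hm
      have hv : v ≠ "" := by simpa using hm'.2
      have hget : cs.getD k "" = v := PySem.Dict.getD_of_mem_items _ hm'.1 hc ""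
      rw [filter_get? ss hs k, ← h k, hget, if_neg hv]
    · rintro ⟨k, v⟩ hm
      have hm' : (k, v) ∈ ss.items ∧ decide (v ≠ "") = true := List.mem_filter.1 hm
      have hv : v ≠ "" := by simpa using hm'.2
      have hget : ss.getD k "" = v := PySem.Dict.getD_of_mem_items _ hm'.1 hs ""
      rw [filter_get? cs hc k, h k, hget, if_neg hv]

-- ===== VERDICT (by name: the statement is the Claim_ definition above) =====
theorem mapping_feedback_status_py_spec : Claim_equal_mapping_feedback_status_py := by
  intro c s _
  unfold Spec_mapping_feedback_status_py
  unfold mapping_feedback_status_py mapping_feedback_status_py_alt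
  set ss := pvSnapshot s with hss
  set cs := pvSnapshot c with hcs
  by_cases hempty : ss.items = []
  · simp [hempty]
  · simp only [if_neg hempty]
    have hc := pvSnapshot_nodup c
    have hs := pvSnapshot_nodup s
    rw [pvLoopA_eq]
    have hiff : (∀ k ∈ PySem.List.sorted
        (PySem.Set.union (PySem.Set.ofList cs.keys) ss.keys) (fun x => x) false,
          cs.getD k "" = ss.getD k "") ↔ (∀ k, cs.getD k "" = ss.getD k "") := by
      constructor
      · intro h k
        by_cases hmem : k ∈ PySem.List.sorted
            (PySem.Set.union (PySem.Set.ofList cs.keys) ss.keys) (fun x => x) false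
        · exact h k hmem
        · have hnotc : k ∉ cs.keys := by
            intro hk
            exact hmem (by
              rw [PySem.List.mem_sorted]
              exact (PySem.Set.mem_union _ _ _).2 (Or.inl ((PySem.Set.mem_ofList _ _).2 hk)))
          have hnots : k ∉ ss.keys := by
            intro hk
            exact hmem (by
              rw [PySem.List.mem_sorted]
              exact (PySem.Set.mem_union _ _ _).2 (Or.inr hk))
          rw [getD_eq_of_not_mem_keys cs k hnotc, getD_eq_of_not_mem_keys ss k hnots]
      · intro h k _
        exact h k
    by_cases hall : ∀ k, cs.getD k "" = ss.getD k ""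
    · rw [if_pos (hiff.2 hall), if_pos ((pvDictEq_iff cs ss hc hs).2 hall)]
    · rw [if_neg (fun hx => hall (hiff.1 hx)),
        if_neg (fun hx => hall ((pvDictEq_iff cs ss hc hs).1 hx))]
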